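-- pv_equiv track=rewrite | github.com/adi2355/RAG-based-ML-Archive | github_collector.py | process_readme_content
-- ===== SOURCE A (Python) =====
-- def process_readme_content(content, repo_name):
--     """
--     Process README content to make it more suitable for storage and analysis
--
--     Args:
--         content: README content as string
--         repo_name: Repository name for context
--
--     Returns:
--         Processed content as string
--     """
--     if not content:
--         return None
--
--     # Remove very long code blocks to save space
--     lines = content.split('\n')
--     processed_lines = []
--     in_code_block = False
--     code_block_length = 0
--     max_code_block_length = 50  # Maximum lines to keep in a code block
--
--     for line in lines:
--         # Check for code block markers
--         if line.strip().startswith('```'):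
--             in_code_block = not in_code_block
--
--             # Reset code block length counter if we're ending a block
--             if not in_code_block:
--                 code_block_length = 0
--
--             processed_lines.append(line)
--         elif in_code_block:
--             code_block_length += 1
--
--             # Skip if we've exceeded the maximum code block length
--             if code_block_length <= max_code_block_length:
--                 processed_lines.append(line)
--             elif code_block_length == max_code_block_length + 1:
--                 # Add a note that we're truncating the code block
--                 processed_lines.append("... [code block truncated] ...")
--         else:
--             processed_lines.append(line)
--
--     processed_content = '\n'.join(processed_lines)
--
--     # Add context about the repository
--     header = f"# {repo_name}\n\n"
--
--     return header + processed_content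
-- ===== SOURCE B (Python) =====
-- def process_readme_content(content, repo_name):
--     if not content:
--         return None
--     lines = content.split('\n')
--     n = len(lines)
--
--     def is_fence(line):
--         return line.strip().startswith('```')
--
--     # Pass 1: partition the lines into segments: ('plain', line) or
--     # ('block', fence_line, body_lines, closing_fence_or_None)
--     segments = []
--     i = 0
--     while i < n:
--         line = lines[i]
--         if is_fence(line):
--             j = i + 1
--             while j < n and not is_fence(lines[j]):
--                 j += 1
--             body = lines[i + 1:j]
--             closer = lines[j] if j < n else None
--             segments.append(('block', line, body, closer))
--             i = j + 1
--         else: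
--             segments.append(('plain', line))
--             i += 1
--
--     # Pass 2: emit, truncating each block body to 50 lines
--     out = []
--     for seg in segments:
--         if seg[0] == 'plain':
--             out.append(seg[1])
--         else:
--             _, fence, body, closer = seg
--             out.append(fence)
--             out.extend(body[:50])
--             if len(body) > 50:
--                 out.append("... [code block truncated] ...")
--             if closer is not None:
--                 out.append(closer)
--
--     return f"# {repo_name}\n\n" + '\n'.join(out)
-- ===== Notes on version B (the rewrite author's own statement) =====
-- stated objective: alternative
-- what changed: A's single flag-driven loop (in_code_block boolean plus line counter mutated per line) is replaced by a two-pass group-then-emit decomposition: pass 1 partitions the lines into plain/code-block segments at the fences, pass 2 emits each block's fence, body[:50], a truncation note if the body exceeds 50 lines, and the closing fence if present.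
import Mathlib
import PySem

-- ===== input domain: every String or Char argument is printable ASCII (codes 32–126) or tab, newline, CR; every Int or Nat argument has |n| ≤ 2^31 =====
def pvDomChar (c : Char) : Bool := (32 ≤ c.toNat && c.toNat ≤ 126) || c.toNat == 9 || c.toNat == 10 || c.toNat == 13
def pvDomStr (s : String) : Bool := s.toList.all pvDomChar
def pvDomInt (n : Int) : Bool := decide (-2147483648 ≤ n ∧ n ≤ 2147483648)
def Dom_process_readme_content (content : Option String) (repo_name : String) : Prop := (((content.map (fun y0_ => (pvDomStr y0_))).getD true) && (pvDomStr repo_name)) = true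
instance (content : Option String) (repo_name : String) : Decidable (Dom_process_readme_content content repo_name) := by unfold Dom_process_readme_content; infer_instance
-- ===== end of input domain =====

-- B replaces A's flag-driven single loop (in_code_block / counter state machine) by a two-pass
-- group-then-emit decomposition: pass 1 partitions the lines into plain/code-block segments,
-- pass 2 emits each segment with its body sliced to 50 lines. Objective: alternative decomposition.


-- ===== PORT A =====
-- line.strip().startswith('```')
def pvFence (line : String) : Bool :=
  PySem.Str.startswith (PySem.Str.strip line) "```"

-- one iteration of A's for-loop: state = (processed_lines, in_code_block, code_block_length)
def pvStepA (st : List String × Bool × Int) (line : String) : List String × Bool × Int :=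
  let (acc, inB, cnt) := st
  if pvFence line then
    let inB' := !inB
    let cnt' := if !inB' then 0 else cnt
    (acc ++ [line], inB', cnt')
  else if inB then
    let cnt' := cnt + 1
    if cnt' ≤ 50 then (acc ++ [line], inB, cnt')
    else if cnt' = 51 then (acc ++ ["... [code block truncated] ..."], inB, cnt')
    else (acc, inB, cnt')
  else (acc ++ [line], inB, cnt)

def process_readme_content (content : Option String) (repo_name : String) : Option String :=
  match content with
  | none => none
  | some s =>
    if PySem.Str.len s = 0 then none
    else
      let lines := (PySem.Str.split? s "\n").getD []
      let st := lines.foldl pvStepA ([], false, 0)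
      some ("# " ++ repo_name ++ "\n\n" ++ PySem.Str.join "\n" st.1)

-- ===== PORT B =====
inductive pvSeg
  | plain : String → pvSeg
  | block : String → List String → Option String → pvSeg

-- pass 1: partition the lines into segments (the index scan i/j of Source B is the
-- takeWhile/dropWhile split at the next fence)
def pvParse : List String → List pvSeg
  | [] => []
  | l :: rest =>
    if pvFence l then
      let body := rest.takeWhile (fun x => !pvFence x)
      match _h : rest.dropWhile (fun x => !pvFence x) with
      | [] => [pvSeg.block l body none]
      | c :: rest' =>
        pvSeg.block l body (some c) :: pvParse rest'
    else pvSeg.plain l :: pvParse rest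
termination_by ls => ls.length
decreasing_by
  · have h1 : (rest.dropWhile (fun x => !pvFence x)).length ≤ rest.length :=
      List.length_dropWhile_le _ _
    rw [_h] at h1
    simp at h1 ⊢
    omega
  · simp

-- pass 2: emit one segment (body[:50], note if len(body) > 50, closer if present)
def pvEmit : pvSeg → List String
  | .plain l => [l]
  | .block f body closer =>
    f :: (PySem.List.slice body none (some 50) ++
      (if body.length > 50 then ["... [code block truncated] ..."] else []) ++
      (match closer with | none => [] | some c => [c]))

def process_readme_content_alt (content : Option String) (repo_name : String) : Option String :=
  match content with
  | none => none
  | some s =>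
    if PySem.Str.len s = 0 then none
    else
      let lines := (PySem.Str.split? s "\n").getD []
      let out := (pvParse lines).flatMap pvEmit
      some ("# " ++ repo_name ++ "\n\n" ++ PySem.Str.join "\n" out)

-- ===== PRECONDITION & SPEC =====
def Spec_process_readme_content (content : Option String) (repo_name : String) (out : Option String) : Prop := out = process_readme_content_alt content repo_name
instance (content : Option String) (repo_name : String) (out : Option String) : Decidable (Spec_process_readme_content content repo_name out) := by unfold Spec_process_readme_content; infer_instance

-- ===== CLAIM (what is proved, stated in full; the proofs are below) =====
def Claim_equal_process_readme_content : Prop := ∀ (content : Option String) (repo_name : String), Dom_process_readme_content content repo_name → Spec_process_readme_content content repo_name (process_readme_content content repo_name)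

-- ===== LEMMAS AND PROOFS =====

-- what A's loop emits for the body of a code block entered with counter c
def pvTrunc : Int → List String → List String
  | _, [] => []
  | c, x :: xs =>
    if c + 1 ≤ 50 then x :: pvTrunc (c + 1) xs
    else if c + 1 = 51 then "... [code block truncated] ..." :: pvTrunc (c + 1) xs
    else pvTrunc (c + 1) xs

theorem pvTrunc_ge (body : List String) : ∀ c : Int, 51 ≤ c → pvTrunc c body = [] := by
  induction body with
  | nil => intro c _; rfl
  | cons x xs ih =>
    intro c hc
    simp only [pvTrunc, if_neg (by omega : ¬ c + 1 ≤ 50), if_neg (by omega : ¬ c + 1 = 51)]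
    exact ih _ (by omega)

theorem pvTrunc_eq (body : List String) : ∀ c : Nat, c ≤ 50 →
    pvTrunc (c : Int) body =
      body.take (50 - c) ++ (if 50 - c < body.length then ["... [code block truncated] ..."] else []) := by
  induction body with
  | nil => intro c _; simp [pvTrunc]
  | cons x xs ih =>
    intro c hc
    by_cases h : c < 50
    · have h1 : (c : Int) + 1 ≤ 50 := by omega
      have hcast : (c : Int) + 1 = ((c + 1 : Nat) : Int) := by push_cast; ring
      have htake : (x :: xs).take (50 - c) = x :: xs.take (50 - (c + 1)) := by
        have : 50 - c = (50 - (c + 1)) + 1 := by omega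
        simp [this]
      have hcond : (50 - c < (x :: xs).length) = (50 - (c + 1) < xs.length) := by
        simp only [List.length_cons, eq_iff_iff]; omega
      show (if (c : Int) + 1 ≤ 50 then x :: pvTrunc ((c : Int) + 1) xs
        else if (c : Int) + 1 = 51 then "... [code block truncated] ..." :: pvTrunc ((c : Int) + 1) xs
        else pvTrunc ((c : Int) + 1) xs) = _
      rw [if_pos h1, hcast, ih (c + 1) (by omega), htake]
      simp only [hcond, List.cons_append]
    · have hc50 : c = 50 := by omega
      subst hc50
      have hcast : ((50 : Nat) : Int) + 1 = 51 := by norm_num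
      simp only [pvTrunc, hcast]
      rw [pvTrunc_ge xs 51 (by omega)]
      norm_num

-- A's loop inside a code block (no fences in body)
theorem pvFold_inblock (body : List String) (h : ∀ x ∈ body, pvFence x = false) :
    ∀ (acc : List String) (c : Int),
      body.foldl pvStepA (acc, true, c) = (acc ++ pvTrunc c body, true, c + body.length) := by
  induction body with
  | nil => intro acc c; simp [pvTrunc]
  | cons x xs ih =>
    intro acc c
    have hx : pvFence x = false := h x (List.mem_cons_self)
    have hxs : ∀ y ∈ xs, pvFence y = false := fun y hy => h y (List.mem_cons_of_mem _ hy)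
    simp only [List.foldl_cons]
    by_cases h1 : c + 1 ≤ 50
    · have : pvStepA (acc, true, c) x = (acc ++ [x], true, c + 1) := by
        simp [pvStepA, hx, h1]
      rw [this, ih hxs]
      exact Prod.ext (by simp [pvTrunc, h1]) (Prod.ext rfl (by push_cast [List.length_cons]; ring))
    · by_cases h2 : c + 1 = 51
      · have : pvStepA (acc, true, c) x = (acc ++ ["... [code block truncated] ..."], true, c + 1) := by
          simp [pvStepA, hx, h2]
        rw [this, ih hxs]
        exact Prod.ext (by simp [pvTrunc, h2]) (Prod.ext rfl (by push_cast [List.length_cons]; ring))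
      · have : pvStepA (acc, true, c) x = (acc, true, c + 1) := by
          simp [pvStepA, hx, h1, h2]
        rw [this, ih hxs]
        exact Prod.ext (by simp [pvTrunc, h1, h2]) (Prod.ext rfl (by push_cast [List.length_cons]; ring))

theorem pvDropWhile_head {α : Type} (p : α → Bool) (xs : List α) (y : α) (ys : List α)
    (h : xs.dropWhile p = y :: ys) : p y = false := by
  induction xs with
  | nil => simp [List.dropWhile] at h
  | cons a as ih =>
    rw [List.dropWhile_cons] at h
    by_cases hp : p a
    · simp [hp] at h; exact ih h
    · simp [hp] at h
      rw [← h.1]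
      simpa using hp

-- main invariant: A's loop started outside a code block produces B's group-then-emit output
theorem pvMain : ∀ (n : Nat) (lines : List String), lines.length ≤ n → ∀ acc : List String,
    (lines.foldl pvStepA (acc, false, 0)).1 = acc ++ (pvParse lines).flatMap pvEmit := by
  intro n
  induction n with
  | zero =>
    intro lines hlen acc
    have : lines = [] := List.eq_nil_of_length_eq_zero (by omega)
    subst this; simp [pvParse]
  | succ n ih =>
    intro lines hlen acc
    match lines with
    | [] => simp [pvParse]
    | l :: rest =>
      have hrlen : rest.length ≤ n := by simp at hlen; omega
      by_cases hf : pvFence l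
      · have hstep : pvStepA (acc, false, 0) l = (acc ++ [l], true, 0) := by
          simp [pvStepA, hf]
        simp only [List.foldl_cons, hstep]
        have hbf : ∀ x ∈ rest.takeWhile (fun x => !pvFence x), pvFence x = false := by
          intro x hx
          have := List.mem_takeWhile_imp hx
          simpa using this
        have hfold := pvFold_inblock (rest.takeWhile (fun x => !pvFence x)) hbf (acc ++ [l]) 0
        have hslice : PySem.List.slice (rest.takeWhile (fun x => !pvFence x)) none (some 50)
            = (rest.takeWhile (fun x => !pvFence x)).take 50 := by
          rw [PySem.List.slice_to _ (by norm_num : (0:Int) ≤ 50)]; rfl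
        have htr : pvTrunc 0 (rest.takeWhile (fun x => !pvFence x)) =
            (rest.takeWhile (fun x => !pvFence x)).take 50 ++
              (if (rest.takeWhile (fun x => !pvFence x)).length > 50
               then ["... [code block truncated] ..."] else []) := by
          have := pvTrunc_eq (rest.takeWhile (fun x => !pvFence x)) 0 (by omega)
          simpa using this
        conv_lhs =>
          rw [(List.takeWhile_append_dropWhile (p := fun x => !pvFence x) (l := rest)).symm,
            List.foldl_append, hfold]
        rw [pvParse.eq_def]
        simp only [if_pos hf]
        cases hdw : rest.dropWhile (fun x => !pvFence x) with
        | nil =>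
          simp only [List.foldl_nil, List.flatMap_cons, List.flatMap_nil, pvEmit,
            hslice, List.append_nil]
          rw [← htr]
          simp
        | cons c rest' =>
          have hc : pvFence c = true := by
            have := pvDropWhile_head (fun x => !pvFence x) rest c rest' hdw
            simpa using this
          have hstep2 : ∀ a : List String, ∀ k : Int, pvStepA (a, true, k) c = (a ++ [c], false, 0) := by
            intro a k; simp [pvStepA, hc]
          have hlen' : rest'.length ≤ n := by
            have h1 : (rest.dropWhile (fun x => !pvFence x)).length ≤ rest.length :=
              List.length_dropWhile_le _ _
            rw [hdw] at h1
            simp at h1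
            omega
          simp only [List.foldl_cons, hstep2]
          rw [ih rest' hlen' _]
          simp only [List.flatMap_cons, pvEmit, hslice]
          rw [← htr]
          simp
      · have hstep : pvStepA (acc, false, 0) l = (acc ++ [l], false, 0) := by
          simp [pvStepA, hf]
        simp only [List.foldl_cons, hstep]
        rw [ih rest hrlen (acc ++ [l])]
        conv_rhs => rw [pvParse.eq_def]
        simp [hf, pvEmit]

-- ===== VERDICT (by name: the statement is the Claim_ definition above) =====
theorem process_readme_content_spec : Claim_equal_process_readme_content := by
  intro content repo_name _hdom
  unfold Spec_process_readme_content
  match content with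
  | none => rfl
  | some s =>
    simp only [process_readme_content, process_readme_content_alt,
      pvMain ((PySem.Str.split? s "\n").getD []).length ((PySem.Str.split? s "\n").getD []) le_rfl [],
      List.nil_append]
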